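-- pv_equiv track=rewrite | github.com/blcklamb/baekjoon-python | solved/silver_string/num4659.py | con2
-- ===== SOURCE A (Python) =====
-- from string import ascii_lowercase
--
-- vowelList = ['a', 'e', 'i', 'o', 'u']
--
-- consoList = [a for a in list(ascii_lowercase) if a not in vowelList]
--
-- def con2(pw):
--     tempV = []
--     tempC = []
--     for i in range(len(pw)-2):
--         if pw[i] in vowelList:
--             tempV.append(pw[i])
--         else:
--             tempC.append(pw[i])
--         if pw[i+1] in vowelList:
--             tempV.append(pw[i+1])
--         else:
--             tempC.append(pw[i+1])
--         if len(tempV)==2 and pw[i+2] in vowelList: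
--             return False
--         if len(tempC)==2 and pw[i+2] in consoList:
--             return False
--         tempV=[]
--         tempC=[]
--     return True
-- ===== SOURCE B (Python) =====
-- VOWELS = "aeiou"
-- CONSONANTS = "bcdfghjklmnpqrstvwxyz"
--
-- def con2(pw):
--     v = 0  # length of current run of vowels
--     c = 0  # length of current run of non-vowels
--     for ch in pw:
--         if ch in VOWELS:
--             if v + 1 >= 3:
--                 return False
--             v += 1
--             c = 0
--         else:
--             if c >= 2 and ch in CONSONANTS:
--                 return False
--             v = 0
--             c += 1
--     return True
-- ===== Notes on version B (the rewrite author's own statement) =====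
-- stated objective: simpler
-- what changed: Replaces A's per-window pass that rebuilds two temporary category lists for every index with a single pass over the characters maintaining two streak counters (consecutive vowels / consecutive non-vowels), returning False as soon as a forbidden triple completes.
import Mathlib
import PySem

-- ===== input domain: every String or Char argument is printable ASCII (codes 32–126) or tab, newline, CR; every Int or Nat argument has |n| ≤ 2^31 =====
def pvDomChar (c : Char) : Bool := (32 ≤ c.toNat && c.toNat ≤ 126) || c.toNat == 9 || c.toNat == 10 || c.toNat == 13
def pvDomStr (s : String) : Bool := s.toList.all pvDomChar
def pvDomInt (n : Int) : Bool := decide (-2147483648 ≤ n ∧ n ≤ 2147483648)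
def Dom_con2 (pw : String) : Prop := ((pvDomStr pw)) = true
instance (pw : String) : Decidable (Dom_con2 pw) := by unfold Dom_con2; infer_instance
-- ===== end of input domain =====

-- B replaces A's per-window rebuild of two temporary category lists by a single
-- pass with two streak counters (objective: simpler); same return value everywhere.

-- ===== PORT A =====
def vowelList : List Char := ['a', 'e', 'i', 'o', 'u']

def asciiLowercase : List Char := "abcdefghijklmnopqrstuvwxyz".toList

def consoList : List Char := asciiLowercase.filter (fun a => !(a ∈ vowelList : Bool))

-- the loop over i in range(len(pw)-2); indices i, i+1, i+2 are always in range,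
-- so pw[i] is ported as pyGetD (exact here)
def con2Go (cs : List Char) : List Int → Bool
  | [] => true
  | i :: rest =>
    let c0 := PySem.List.pyGetD cs i ' '
    let c1 := PySem.List.pyGetD cs (i + 1) ' '
    let c2 := PySem.List.pyGetD cs (i + 2) ' '
    let tempV := (if c0 ∈ vowelList then [c0] else []) ++ (if c1 ∈ vowelList then [c1] else [])
    let tempC := (if c0 ∈ vowelList then ([] : List Char) else [c0]) ++ (if c1 ∈ vowelList then ([] : List Char) else [c1])
    if tempV.length = 2 ∧ c2 ∈ vowelList then false
    else if tempC.length = 2 ∧ c2 ∈ consoList then false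
    else con2Go cs rest

def con2 (pw : String) : Bool :=
  con2Go pw.toList (PySem.List.pyRange 0 ((pw.toList.length : Int) - 2) 1)

-- ===== PORT B =====
def vowelChars : List Char := "aeiou".toList

def consoChars : List Char := "bcdfghjklmnpqrstvwxyz".toList

def altGo : List Char → Nat → Nat → Bool
  | [], _, _ => true
  | ch :: rest, v, c =>
    if ch ∈ vowelChars then
      if v + 1 ≥ 3 then false
      else altGo rest (v + 1) 0
    else
      if c ≥ 2 ∧ ch ∈ consoChars then false
      else altGo rest 0 (c + 1)

def con2_alt (pw : String) : Bool := altGo pw.toList 0 0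

-- ===== PRECONDITION & SPEC =====
def Spec_con2 (pw : String) (out : Bool) : Prop := out = con2_alt pw
instance (pw : String) (out : Bool) : Decidable (Spec_con2 pw out) := by unfold Spec_con2; infer_instance

-- ===== CLAIM (what is proved, stated in full; the proofs are below) =====
def Claim_equal_con2 : Prop := ∀ (pw : String), Dom_con2 pw → Spec_con2 pw (con2 pw)

-- ===== LEMMAS AND PROOFS =====

-- common window predicate: a triple that A's loop body rejects
def bad3 (a b c : Char) : Bool :=
  (a ∈ vowelList && b ∈ vowelList && c ∈ vowelList) ||
  (!(a ∈ vowelList : Bool) && !(b ∈ vowelList : Bool) && c ∈ consoList)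

def wloop : List Char → Bool
  | a :: b :: c :: rest => !bad3 a b c && wloop (b :: c :: rest)
  | _ => true

lemma wloop_short (cs : List Char) (h : cs.length ≤ 2) : wloop cs = true := by
  match cs with
  | [] => rfl
  | [_] => rfl
  | [_, _] => rfl
  | _ :: _ :: _ :: _ => simp at h

lemma wloop_congr2 : ∀ (rest : List Char) (x y x' y' : Char),
    (x ∈ vowelList ↔ x' ∈ vowelList) → (y ∈ vowelList ↔ y' ∈ vowelList) →
    wloop (x :: y :: rest) = wloop (x' :: y' :: rest) := by
  intro rest
  induction rest with
  | nil => intro _ _ _ _ _ _; rfl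
  | cons r rs ih =>
    intro x y x' y' hx hy
    simp only [wloop, bad3]
    rw [ih y r y' r hy Iff.rfl]
    have hx' : (decide (x ∈ vowelList)) = (decide (x' ∈ vowelList)) := by
      simp [hx]
    have hy' : (decide (y ∈ vowelList)) = (decide (y' ∈ vowelList)) := by
      simp [hy]
    rw [hx', hy']

lemma wloop_congr1 (rest : List Char) (x x' : Char)
    (hx : x ∈ vowelList ↔ x' ∈ vowelList) :
    wloop (x :: rest) = wloop (x' :: rest) := by
  cases rest with
  | nil => rfl
  | cons y rs => exact wloop_congr2 rs x y x' y hx Iff.rfl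

-- ---- A-side: con2 computes wloop ----
lemma con2Go_pyRange (n : Nat) : ∀ (cs : List Char) (k : Nat), cs.length - k = n →
    con2Go cs (PySem.List.pyRange (k : Int) ((cs.length : Int) - 2) 1) = wloop (cs.drop k) := by
  induction n using Nat.strong_induction_on with
  | _ n ih =>
    intro cs k hn
    by_cases h : ((cs.length : Int) - 2) ≤ (k : Int)
    · rw [PySem.List.pyRange_one_eq_nil h]
      have : (cs.drop k).length ≤ 2 := by
        simp only [List.length_drop]; omega
      rw [wloop_short _ this]; rfl
    · have hk : k + 2 < cs.length := by omega
      rw [PySem.List.pyRange_one_cons (by omega)]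
      have e0 : PySem.List.pyGetD cs (k : Int) ' ' = cs[k] :=
        PySem.List.pyGetD_ofNat cs k ' ' (by omega)
      have e1 : PySem.List.pyGetD cs ((k : Int) + 1) ' ' = cs[k + 1] := by
        have : ((k : Int) + 1) = ((k + 1 : Nat) : Int) := by push_cast; ring
        rw [this]; exact PySem.List.pyGetD_ofNat cs (k + 1) ' ' (by omega)
      have e2 : PySem.List.pyGetD cs ((k : Int) + 2) ' ' = cs[k + 2] := by
        have : ((k : Int) + 2) = ((k + 2 : Nat) : Int) := by push_cast; ring
        rw [this]; exact PySem.List.pyGetD_ofNat cs (k + 2) ' ' (by omega)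
      have hd : cs.drop k = cs[k] :: cs[k + 1] :: cs[k + 2] :: cs.drop (k + 3) := by
        rw [List.drop_eq_getElem_cons (by omega), List.drop_eq_getElem_cons (by omega),
            List.drop_eq_getElem_cons (by omega)]
      have step : ((k : Int) + 1) = ((k + 1 : Nat) : Int) := by push_cast; ring
      have tail : con2Go cs (PySem.List.pyRange ((k : Int) + 1) ((cs.length : Int) - 2) 1)
          = wloop (cs.drop (k + 1)) := by
        rw [step]; exact ih (n - 1) (by omega) cs (k + 1) (by omega)
      rw [hd]
      simp only [con2Go, e0, e1, e2, wloop, bad3]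
      have hd1 : cs.drop (k + 1) = cs[k + 1] :: cs[k + 2] :: cs.drop (k + 3) := by
        rw [List.drop_eq_getElem_cons (by omega), List.drop_eq_getElem_cons (by omega)]
      rw [hd1] at tail
      by_cases h0 : cs[k] ∈ vowelList <;> by_cases h1 : cs[k + 1] ∈ vowelList <;>
        by_cases h2 : cs[k + 2] ∈ vowelList <;> by_cases h3 : cs[k + 2] ∈ consoList <;>
        simp [h0, h1, h2, h3, tail]

lemma con2_eq_wloop (pw : String) : con2 pw = wloop pw.toList := by
  have := con2Go_pyRange pw.toList.length pw.toList 0 (by omega)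
  simpa using this

-- ---- B-side: con2_alt computes wloop ----
-- the streak state (v vowels / min c 2 non-vowels) rendered as a context prefix
def ctx (v c : Nat) : List Char := List.replicate v 'a' ++ List.replicate (min c 2) '1'

lemma aMemV : 'a' ∈ vowelList := by decide

lemma oneNotV : '1' ∉ vowelList := by decide

lemma vowel_not_conso (ch : Char) (h : ch ∈ vowelList) : ch ∉ consoList := by
  fin_cases h <;> decide

lemma wloop_1v (ch : Char) (rest : List Char) (h : ch ∈ vowelList) :
    wloop ('1' :: ch :: rest) = wloop ('a' :: rest) := by
  cases rest with
  | nil => rfl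
  | cons r rs =>
    simp only [wloop, bad3]
    rw [wloop_congr2 rs ch r 'a' r (iff_of_true h aMemV) Iff.rfl]
    simp [h, oneNotV]

lemma wloop_av (ch : Char) (rest : List Char) (h : ch ∉ vowelList) :
    wloop ('a' :: ch :: rest) = wloop ('1' :: rest) := by
  cases rest with
  | nil => rfl
  | cons r rs =>
    simp only [wloop, bad3]
    rw [wloop_congr2 rs ch r '1' r (iff_of_false h oneNotV) Iff.rfl]
    simp [h, aMemV]

lemma altGo_wloop : ∀ (cs : List Char) (v c : Nat), v ≤ 2 → (v = 0 ∨ c = 0) →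
    altGo cs v c = wloop (ctx v c ++ cs) := by
  intro cs
  induction cs with
  | nil =>
    intro v c hv _
    have : (ctx v c ++ []).length ≤ 2 := by
      simp only [List.append_nil, ctx, List.length_append, List.length_replicate]
      omega
    rw [wloop_short _ this]; rfl
  | cons ch rest ih =>
    intro v c hv hvc
    by_cases hch : ch ∈ vowelChars
    · have hchv : ch ∈ vowelList := hch
      interval_cases v
      · -- v = 0, c arbitrary
        have lhs : altGo (ch :: rest) 0 c = altGo rest 1 0 := by simp [altGo, hch]
        rw [lhs, ih 1 0 (by omega) (Or.inr rfl)]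
        symm
        rcases Nat.lt_or_ge c 1 with h | h
        · have hc : c = 0 := by omega
          subst hc
          exact wloop_congr1 rest ch 'a' (iff_of_true hchv aMemV)
        · rcases Nat.lt_or_ge c 2 with h2 | h2
          · have hc : c = 1 := by omega
            subst hc
            exact wloop_1v ch rest hchv
          · have hm : min c 2 = 2 := by omega
            show wloop (ctx 0 c ++ ch :: rest) = wloop (ctx 1 0 ++ rest)
            simp only [ctx, hm, List.nil_append, List.replicate]
            show wloop ('1' :: '1' :: ch :: rest) = wloop ('a' :: rest)
            have step1 : wloop ('1' :: '1' :: ch :: rest) = wloop ('1' :: ch :: rest) := by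
              simp [wloop, bad3, oneNotV, vowel_not_conso ch hchv]
            rw [step1]
            exact wloop_1v ch rest hchv
      · -- v = 1, c = 0
        have hc : c = 0 := by rcases hvc with h | h <;> omega
        subst hc
        have lhs : altGo (ch :: rest) 1 0 = altGo rest 2 0 := by simp [altGo, hch]
        rw [lhs, ih 2 0 (by omega) (Or.inr rfl)]
        symm
        exact wloop_congr2 rest 'a' ch 'a' 'a' Iff.rfl (iff_of_true hchv aMemV)
      · -- v = 2, c = 0
        have hc : c = 0 := by rcases hvc with h | h <;> omega
        subst hc
        have lhs : altGo (ch :: rest) 2 0 = false := by simp [altGo, hch]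
        rw [lhs]
        symm
        show wloop ('a' :: 'a' :: ch :: rest) = false
        simp [wloop, bad3, aMemV, hchv]
    · have hchv : ch ∉ vowelList := hch
      by_cases hcc : c ≥ 2 ∧ ch ∈ consoChars
      · have hv0 : v = 0 := by rcases hvc with h | h <;> omega
        subst hv0
        have hm : min c 2 = 2 := by omega
        have lhs : altGo (ch :: rest) 0 c = false := by simp [altGo, hch, hcc.1, hcc.2]
        rw [lhs]
        symm
        show wloop (ctx 0 c ++ ch :: rest) = false
        simp only [ctx, hm, List.nil_append, List.replicate]
        have hcons : ch ∈ consoList := hcc.2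
        simp [wloop, bad3, oneNotV, hchv, hcons]
      · have lhs : altGo (ch :: rest) v c = altGo rest 0 (c + 1) := by
          simp [altGo, hch, hcc]
        rw [lhs, ih 0 (c + 1) (by omega) (Or.inl rfl)]
        symm
        have hv0c0 : v = 0 ∨ (v ≥ 1 ∧ c = 0) := by
          rcases hvc with h | h; · exact Or.inl h
          · rcases Nat.eq_zero_or_pos v with h' | h'
            · exact Or.inl h'
            · exact Or.inr ⟨h', h⟩
        rcases hv0c0 with hv0 | ⟨hv1, hc0⟩
        · subst hv0
          rcases Nat.lt_or_ge c 1 with h | h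
          · have hc : c = 0 := by omega
            subst hc
            exact wloop_congr1 rest ch '1' (iff_of_false hchv oneNotV)
          · rcases Nat.lt_or_ge c 2 with h2 | h2
            · have hc : c = 1 := by omega
              subst hc
              exact wloop_congr2 rest '1' ch '1' '1' Iff.rfl (iff_of_false hchv oneNotV)
            · have hm : min c 2 = 2 := by omega
              have hm' : min (c + 1) 2 = 2 := by omega
              show wloop (ctx 0 c ++ ch :: rest) = wloop (ctx 0 (c + 1) ++ rest)
              simp only [ctx, hm, hm', List.nil_append, List.replicate]
              show wloop ('1' :: '1' :: ch :: rest) = wloop ('1' :: '1' :: rest)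
              have hnc : ch ∉ consoList := fun hmem => hcc ⟨h2, hmem⟩
              have step1 : wloop ('1' :: '1' :: ch :: rest) = wloop ('1' :: ch :: rest) := by
                simp [wloop, bad3, oneNotV, hchv, hnc]
              rw [step1]
              exact wloop_congr2 rest '1' ch '1' '1' Iff.rfl (iff_of_false hchv oneNotV)
        · subst hc0
          interval_cases v
          · show wloop ('a' :: ch :: rest) = wloop ('1' :: rest)
            exact wloop_av ch rest hchv
          · show wloop ('a' :: 'a' :: ch :: rest) = wloop ('1' :: rest)
            have step1 : wloop ('a' :: 'a' :: ch :: rest) = wloop ('a' :: ch :: rest) := by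
              simp [wloop, bad3, aMemV, hchv]
            rw [step1]
            exact wloop_av ch rest hchv

lemma con2_alt_eq_wloop (pw : String) : con2_alt pw = wloop pw.toList := by
  have := altGo_wloop pw.toList 0 0 (by omega) (Or.inl rfl)
  simpa [con2_alt, ctx] using this

-- ===== VERDICT (by name: the statement is the Claim_ definition above) =====
theorem con2_spec : Claim_equal_con2 := by
  intro pw _
  show con2 pw = con2_alt pw
  rw [con2_eq_wloop, con2_alt_eq_wloop]
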